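-- pv_equiv track=rewrite | github.com/pypi-data/pypi-mirror-403 | packages/urban-worm/urban_worm-0.1.2.tar.gz/urban_worm-0.1.2/urbanworm/utils/utils.py | pick_best_mmproj
-- ===== SOURCE A (Python) =====
-- from typing import Sequence
--
-- def pick_best_mmproj(files: Sequence[str], prefer: Sequence[str]) -> str:
--     # mmproj is typically named with "mmproj" and endswith .bin or .gguf
--     candidates = [
--         f for f in files
--         if "mmproj" in f.lower() and (f.lower().endswith(".bin") or f.lower().endswith(".gguf"))
--     ]
--     if not candidates:
--         raise FileNotFoundError("No mmproj file found in repo (expected name containing 'mmproj').")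
--
--     # Prefer hints if provided (e.g., f16, q8_0) but keep simple
--     for p in prefer:
--         for f in candidates:
--             if p.lower() in f.lower():
--                 return f
--
--     candidates_sorted = sorted(candidates, key=lambda x: (len(x), x))
--     return candidates_sorted[0]
-- ===== SOURCE B (Python) =====
-- def pick_best_mmproj(files, prefer):
--     candidates = [
--         f for f in files
--         if "mmproj" in f.lower() and (f.lower().endswith(".bin") or f.lower().endswith(".gguf"))
--     ]
--     if not candidates:
--         raise FileNotFoundError("No mmproj file found in repo (expected name containing 'mmproj').")
--
--     sentinel = len(prefer)
--
--     def rank(f):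
--         fl = f.lower()
--         i = 0
--         for p in prefer:
--             if p.lower() in fl:
--                 return i
--             i += 1
--         return sentinel
--
--     # one pass: rank table, then argmin over (rank, position)
--     ranks = [rank(f) for f in candidates]
--     best_j = 0
--     best_r = ranks[0]
--     j = 0
--     for r in ranks:
--         if r < best_r:
--             best_j, best_r = j, r
--         j += 1
--     if best_r < sentinel:
--         return candidates[best_j]
--     return sorted(candidates, key=lambda x: (len(x), x))[0]
-- ===== Notes on version B (the rewrite author's own statement) =====
-- stated objective: alternative
-- what changed: Replaced A's nested prefer-by-candidate short-circuit loops with a rank table (best prefer index per candidate, sentinel len(prefer)) followed by a single argmin pass over (rank, position); the no-match sentinel case falls through to the same (len,x) sorted fallback.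
import Mathlib
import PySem

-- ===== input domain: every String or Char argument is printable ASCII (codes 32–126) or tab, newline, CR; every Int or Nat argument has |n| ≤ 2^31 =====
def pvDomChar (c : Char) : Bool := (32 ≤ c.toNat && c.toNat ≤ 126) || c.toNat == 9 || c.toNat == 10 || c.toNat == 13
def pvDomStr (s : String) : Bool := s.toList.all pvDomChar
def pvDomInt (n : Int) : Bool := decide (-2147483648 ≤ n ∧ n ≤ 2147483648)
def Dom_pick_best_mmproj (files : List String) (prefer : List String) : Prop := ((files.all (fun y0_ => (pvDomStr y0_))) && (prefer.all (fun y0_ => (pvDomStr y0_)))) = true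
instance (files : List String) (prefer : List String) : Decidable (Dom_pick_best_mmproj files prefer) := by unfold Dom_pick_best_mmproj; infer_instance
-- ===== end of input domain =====

-- B replaces A's nested prefer×candidate scans by a rank table plus a single argmin pass (alternative decomposition, same cost).


-- ===== PORT A =====
-- shared with B: the candidate filter and the p.lower() in f.lower() test (identical Python in both)
def pvCandFilter (f : String) : Bool :=
  PySem.Str.isIn "mmproj" (PySem.Str.lower f) &&
    (PySem.Str.endswith (PySem.Str.lower f) ".bin" || PySem.Str.endswith (PySem.Str.lower f) ".gguf")

def pvMatch (p f : String) : Bool := PySem.Str.isIn (PySem.Str.lower p) (PySem.Str.lower f)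

-- the (len(x), x)-sorted fallback, identical in both Pythons
def pvFallback (cands : List String) : String :=
  (PySem.List.sorted2 cands (fun x => PySem.Str.len x) (fun x => x)).headD ""

-- A's nested loops: for p in prefer: for f in candidates: if p.lower() in f.lower(): return f
def pvLoopA (prefer cands : List String) : Option String :=
  match prefer with
  | [] => none
  | p :: ps =>
    match cands.find? (fun f => pvMatch p f) with
    | some f => some f
    | none => pvLoopA ps cands

def pick_best_mmproj (files : List String) (prefer : List String) : String :=
  let cands := files.filter pvCandFilter
  -- the Python raises FileNotFoundError when cands = []; excluded by Pre_ (port then yields pvFallback [] = "")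
  match pvLoopA prefer cands with
  | some f => f
  | none => pvFallback cands

-- ===== PORT B =====
-- rank(f): index of the first hint contained in f.lower(), else len(prefer) (the i-accumulator of B's loop)
def pvRankAux (f : String) (i : Nat) (ps : List String) : Nat :=
  match ps with
  | [] => i
  | p :: ps => if pvMatch p f then i else pvRankAux f (i + 1) ps

-- B's argmin loop over the rank table: state (best_j, best_r), j the running index
def pvArgmin (rs : List Nat) (j bj br : Nat) : Nat × Nat :=
  match rs with
  | [] => (bj, br)
  | r :: rest => if r < br then pvArgmin rest (j + 1) j r else pvArgmin rest (j + 1) bj br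

def pick_best_mmproj_alt (files : List String) (prefer : List String) : String :=
  let cands := files.filter pvCandFilter
  match cands with
  | [] => ""  -- the Python raises FileNotFoundError here; excluded by Pre_
  | _ :: _ =>
    let ranks := cands.map (fun f => pvRankAux f 0 prefer)
    let p := pvArgmin ranks 0 0 (ranks.headD 0)
    if p.2 < prefer.length then cands.getD p.1 "" else pvFallback cands

-- ===== PRECONDITION & SPEC =====
-- Pre_ excludes exactly the inputs with no mmproj candidate, on which the Python A raises FileNotFoundError.
def Pre_pick_best_mmproj (files : List String) (prefer : List String) : Prop :=
  files.any (fun f =>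
    PySem.Str.isIn "mmproj" (PySem.Str.lower f) &&
      (PySem.Str.endswith (PySem.Str.lower f) ".bin" || PySem.Str.endswith (PySem.Str.lower f) ".gguf")) = true
instance (files : List String) (prefer : List String) : Decidable (Pre_pick_best_mmproj files prefer) := by
  unfold Pre_pick_best_mmproj; infer_instance

def pvWitness_pick_best_mmproj : List String × List String := (["mmproj-F16.gguf", "x-mmproj-q8_0.bin"], ["q8_0"])

def Spec_pick_best_mmproj (files : List String) (prefer : List String) (out : String) : Prop := out = pick_best_mmproj_alt files prefer
instance (files : List String) (prefer : List String) (out : String) : Decidable (Spec_pick_best_mmproj files prefer out) := by unfold Spec_pick_best_mmproj; infer_instance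

-- ===== CLAIM (what is proved, stated in full; the proofs are below) =====
def Claim_equal_pick_best_mmproj : Prop := ∀ (files : List String) (prefer : List String), Dom_pick_best_mmproj files prefer → Pre_pick_best_mmproj files prefer → Spec_pick_best_mmproj files prefer (pick_best_mmproj files prefer)

-- ===== LEMMAS AND PROOFS =====

-- rank accumulator shift
theorem pvRankAux_shift (f : String) (i : Nat) (ps : List String) :
    pvRankAux f i ps = i + pvRankAux f 0 ps := by
  induction ps generalizing i with
  | nil => simp [pvRankAux]
  | cons p ps ih =>
    simp only [pvRankAux]
    by_cases h : pvMatch p f <;> simp [h, ih 1, ih (i+1)] <;> omega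

-- br = 0 is absorbing
theorem pvArgmin_zero (rs : List Nat) (j bj : Nat) : pvArgmin rs j bj 0 = (bj, 0) := by
  induction rs generalizing j with
  | nil => rfl
  | cons r rest ih => simp [pvArgmin, ih]

-- shifting every rank by one shifts only the best rank
theorem pvArgmin_shift (rs : List Nat) (j bj br : Nat) :
    pvArgmin (rs.map (· + 1)) j bj (br + 1) = ((pvArgmin rs j bj br).1, (pvArgmin rs j bj br).2 + 1) := by
  induction rs generalizing j bj br with
  | nil => rfl
  | cons r rest ih =>
    simp only [List.map_cons, pvArgmin]
    by_cases h : r < br <;> simp [h, Nat.add_lt_add_iff_right, ih]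

-- a first zero after positive ranks wins the argmin
theorem pvArgmin_first_zero (xs ys : List Nat) (j bj br : Nat)
    (hxs : ∀ x ∈ xs, x ≠ 0) (hbr : 1 ≤ br) :
    pvArgmin (xs ++ 0 :: ys) j bj br = (j + xs.length, 0) := by
  induction xs generalizing j bj br with
  | nil =>
    simp only [List.nil_append, pvArgmin, List.length_nil, Nat.add_zero]
    rw [if_pos (by omega : 0 < br), pvArgmin_zero]
  | cons x xs ih =>
    have hx : x ≠ 0 := hxs x (by simp)
    have hxs' : ∀ y ∈ xs, y ≠ 0 := fun y hy => hxs y (by simp [hy])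
    simp only [List.cons_append, pvArgmin]
    by_cases h : x < br
    · rw [if_pos h, ih _ _ _ hxs' (by omega)]
      simp only [List.length_cons]
      congr 1
      omega
    · rw [if_neg h, ih _ _ _ hxs' hbr]
      simp only [List.length_cons]
      congr 1
      omega

theorem pvLoopA_nil (prefer : List String) : pvLoopA prefer [] = none := by
  induction prefer with
  | nil => rfl
  | cons p ps ih => simp [pvLoopA, ih]

theorem getD_append_len (xs ys : List String) (f : String) :
    (xs ++ f :: ys).getD xs.length "" = f := by
  induction xs with
  | nil => rfl
  | cons x xs ih => simpa using ih

-- main bridge: A's nested loops equal B's rank-table argmin selection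
theorem pvLoopA_eq_argmin (prefer cands : List String) (hne : cands ≠ []) :
    pvLoopA prefer cands =
      (let ranks := cands.map (fun f => pvRankAux f 0 prefer)
       let p := pvArgmin ranks 0 0 (ranks.headD 0)
       if p.2 < prefer.length then some (cands.getD p.1 "") else none) := by
  induction prefer generalizing cands with
  | nil =>
    obtain ⟨c, cs, rfl⟩ := List.exists_cons_of_ne_nil hne
    simp [pvLoopA, pvRankAux, pvArgmin_zero]
  | cons p ps ih =>
    simp only [pvLoopA]
    cases hfind : cands.find? (fun f => pvMatch p f) with
    | some f =>
      rw [List.find?_eq_some_iff_append] at hfind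
      obtain ⟨hf, xs, ys, rfl, hxs⟩ := hfind
      have hrank : ∀ g, pvRankAux g 0 (p :: ps) = if pvMatch p g then 0 else pvRankAux g 0 ps + 1 := by
        intro g; simp only [pvRankAux]
        by_cases h : pvMatch p g <;> simp [h, pvRankAux_shift g 1, Nat.add_comm]
      have hmap : (xs ++ f :: ys).map (fun g => pvRankAux g 0 (p :: ps)) =
          xs.map (fun g => pvRankAux g 0 (p :: ps)) ++ 0 :: ys.map (fun g => pvRankAux g 0 (p :: ps)) := by
        simp [hrank f, hf]
      have hpos : ∀ x ∈ xs.map (fun g => pvRankAux g 0 (p :: ps)), x ≠ 0 := by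
        intro x hx
        obtain ⟨g, hg, rfl⟩ := List.mem_map.mp hx
        have := hxs g hg
        simp only [Bool.not_eq_eq_eq_not, Bool.not_true] at this
        simp [hrank g, this]
      simp only [hmap]
      cases hxscase : xs.map (fun g => pvRankAux g 0 (p :: ps)) with
      | nil =>
        have hxsnil : xs = [] := by
          cases xs with
          | nil => rfl
          | cons a as => simp at hxscase
        subst hxsnil
        simp [pvArgmin_zero, pvLoopA]
      | cons r rest =>
        rw [hxscase] at hpos
        have hr1 : 1 ≤ r := by
          have := hpos r (by simp); omega
        have hfz := pvArgmin_first_zero (r :: rest)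
          (ys.map (fun g => pvRankAux g 0 (p :: ps))) 0 0 r hpos hr1
        simp only [List.cons_append] at hfz ⊢
        simp only [List.headD_cons]
        rw [hfz]
        have hlen : rest.length + 1 = xs.length := by
          have := congrArg List.length hxscase; simpa using this.symm
        simp only [List.length_cons, Nat.zero_add, hlen, getD_append_len]
        simp
    | none =>
      have hnomatch : ∀ g ∈ cands, pvMatch p g = false := by
        intro g hg
        have := List.find?_eq_none.mp hfind g hg
        simpa using this
      have hrank : ∀ g ∈ cands, pvRankAux g 0 (p :: ps) = pvRankAux g 0 ps + 1 := by
        intro g hg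
        simp only [pvRankAux, hnomatch g hg]
        simp [pvRankAux_shift g 1, Nat.add_comm]
      have hmap : cands.map (fun g => pvRankAux g 0 (p :: ps)) =
          (cands.map (fun g => pvRankAux g 0 ps)).map (· + 1) := by
        rw [List.map_map]
        exact List.map_congr_left (fun g hg => by simp [hrank g hg])
      obtain ⟨c, cs, rfl⟩ := List.exists_cons_of_ne_nil hne
      rw [ih _ hne]
      simp only [hmap]
      have hhead : ((((c :: cs).map (fun g => pvRankAux g 0 ps)).map (· + 1)).headD 0) =
          ((c :: cs).map (fun g => pvRankAux g 0 ps)).headD 0 + 1 := by simp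
      rw [hhead, pvArgmin_shift]
      simp only [List.length_cons, Nat.add_lt_add_iff_right]

-- ===== VERDICT (by name: the statement is the Claim_ definition above) =====
theorem pick_best_mmproj_spec : Claim_equal_pick_best_mmproj := by
  intro files prefer _hdom _hpre
  unfold Spec_pick_best_mmproj pick_best_mmproj pick_best_mmproj_alt
  cases hc : files.filter pvCandFilter with
  | nil => simp [hc, pvLoopA_nil, pvFallback, PySem.List.sorted2]
  | cons c cs =>
    simp only [hc]
    rw [pvLoopA_eq_argmin prefer (c :: cs) (by simp)]
    split <;> rename_i h <;> simp_all
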